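-- pv_equiv track=rewrite | github.com/IlMinCho/Algorithm | swea/1209.py | max_sum_in_grid
-- ===== SOURCE A (Python) =====
-- def max_sum_in_grid(grid):
--     size = len(grid)
--
--     max_sum = 0
--
--     # 행의 합 계산
--     for row in grid:
--         row_sum = sum(row)
--         if row_sum > max_sum:
--             max_sum = row_sum
--
--     # 열의 합 계산
--     for col in range(size):
--         col_sum = sum(grid[row][col] for row in range(size))
--         if col_sum > max_sum:
--             max_sum = col_sum
--
--     # 주요 대각선의 합 계산
--     diag1_sum = sum(grid[i][i] for i in range(size))
--     if diag1_sum > max_sum: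
--         max_sum = diag1_sum
--
--     # 부 대각선의 합 계산
--     diag2_sum = sum(grid[i][size - 1 - i] for i in range(size))
--     if diag2_sum > max_sum:
--         max_sum = diag2_sum
--
--     return max_sum
-- ===== SOURCE B (Python) =====
-- def max_sum_in_grid(grid):
--     size = len(grid)
--     row_sums = []
--     col_sums = [0] * size
--     diag1 = 0
--     diag2 = 0
--     for i, row in enumerate(grid):
--         row_sums.append(sum(row))
--         for j in range(size):
--             x = row[j]
--             col_sums[j] += x
--             if i == j:
--                 diag1 += x
--             if i + j == size - 1:
--                 diag2 += x
--     return max([0] + row_sums + col_sums + [diag1, diag2])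
-- ===== Notes on version B (the rewrite author's own statement) =====
-- stated objective: alternative
-- what changed: Replaces A's four separate passes (per-row sums, a nested per-column rescan, and two diagonal scans) by a single fused pass over (i, j) that accumulates row sums, column sums and both diagonal sums simultaneously, followed by one max over the collected line sums seeded with 0.
import Mathlib
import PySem

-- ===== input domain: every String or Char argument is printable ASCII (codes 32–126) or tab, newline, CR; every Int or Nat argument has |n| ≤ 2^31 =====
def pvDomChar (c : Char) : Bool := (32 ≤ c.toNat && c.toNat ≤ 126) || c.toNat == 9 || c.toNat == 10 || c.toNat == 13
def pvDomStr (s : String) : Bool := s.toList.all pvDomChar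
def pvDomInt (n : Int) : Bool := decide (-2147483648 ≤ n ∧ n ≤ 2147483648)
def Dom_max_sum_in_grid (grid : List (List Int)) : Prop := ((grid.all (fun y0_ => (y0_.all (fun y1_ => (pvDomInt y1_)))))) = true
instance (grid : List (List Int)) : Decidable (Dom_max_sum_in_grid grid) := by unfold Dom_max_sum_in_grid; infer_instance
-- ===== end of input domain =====

-- B replaces A's four separate passes by one fused pass over (i, j) accumulating row/column/diagonal
-- sums simultaneously, then a single max seeded with 0 (alternative decomposition, same asymptotic cost).

-- ===== PORT A =====
def max_sum_in_grid (grid : List (List Int)) : Int :=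
  let size : Int := grid.length
  -- for row in grid: if sum(row) > max_sum: …
  let m1 : Int := grid.foldl (fun m row =>
      let rowSum := row.sum
      if rowSum > m then rowSum else m) 0
  -- for col in range(size): col_sum = sum(grid[row][col] for row in range(size)); …
  let m2 : Int := (PySem.List.pyRange 0 size 1).foldl (fun m col =>
      let colSum := (PySem.List.pyRange 0 size 1).foldl
          (fun s r => s + PySem.List.pyGetD (PySem.List.pyGetD grid r []) col 0) 0
      if colSum > m then colSum else m) m1
  -- diag1_sum = sum(grid[i][i] for i in range(size))
  let diag1 : Int := (PySem.List.pyRange 0 size 1).foldl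
      (fun s i => s + PySem.List.pyGetD (PySem.List.pyGetD grid i []) i 0) 0
  let m3 : Int := if diag1 > m2 then diag1 else m2
  -- diag2_sum = sum(grid[i][size - 1 - i] for i in range(size))
  let diag2 : Int := (PySem.List.pyRange 0 size 1).foldl
      (fun s i => s + PySem.List.pyGetD (PySem.List.pyGetD grid i []) (size - 1 - i) 0) 0
  if diag2 > m3 then diag2 else m3

-- ===== PORT B =====
-- inner-loop body of Source B: state (col_sums, diag1, diag2), loop variable j (x = row[j])
def pvInnerStep (i szI : Int) (row : List Int) (q : List Int × Int × Int) (j : Int) :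
    List Int × Int × Int :=
  let x := PySem.List.pyGetD row j 0
  (PySem.List.pySetD q.1 j (PySem.List.pyGetD q.1 j 0 + x),
   if i = j then q.2.1 + x else q.2.1,
   if i + j = szI - 1 then q.2.2 + x else q.2.2)

-- outer-loop body of Source B: state (row_sums, col_sums, diag1, diag2), element (i, row)
def pvOuterStep (szI : Int) (st : List Int × List Int × Int × Int) (p : Int × List Int) :
    List Int × List Int × Int × Int :=
  let inner := (PySem.List.pyRange 0 szI 1).foldl (pvInnerStep p.1 szI p.2)
      (st.2.1, st.2.2.1, st.2.2.2)
  (st.1 ++ [p.2.sum], inner.1, inner.2.1, inner.2.2)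

def max_sum_in_grid_alt (grid : List (List Int)) : Int :=
  let szI : Int := grid.length
  let st := (PySem.List.enumerate grid 0).foldl (pvOuterStep szI)
      ([], List.replicate grid.length 0, 0, 0)
  let lines := st.1 ++ st.2.1 ++ [st.2.2.1, st.2.2.2]
  (PySem.List.max? ((0 : Int) :: lines) (fun y => y)).getD 0

-- ===== PRECONDITION & SPEC =====
-- Pre_ excludes exactly the grids on which A raises IndexError: those with a row shorter than
-- len(grid) (A indexes grid[row][col] for every col < len(grid)).
def Pre_max_sum_in_grid (grid : List (List Int)) : Prop :=
  ∀ row ∈ grid, grid.length ≤ row.length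
instance (grid : List (List Int)) : Decidable (Pre_max_sum_in_grid grid) := by
  unfold Pre_max_sum_in_grid; infer_instance

def pvWitness_max_sum_in_grid : List (List Int) := [[1, -2], [3, 4]]

def Spec_max_sum_in_grid (grid : List (List Int)) (out : Int) : Prop := out = max_sum_in_grid_alt grid
instance (grid : List (List Int)) (out : Int) : Decidable (Spec_max_sum_in_grid grid out) := by unfold Spec_max_sum_in_grid; infer_instance

-- ===== CLAIM (what is proved, stated in full; the proofs are below) =====
def Claim_equal_max_sum_in_grid : Prop := ∀ (grid : List (List Int)), Dom_max_sum_in_grid grid → Pre_max_sum_in_grid grid → Spec_max_sum_in_grid grid (max_sum_in_grid grid)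

-- ===== LEMMAS AND PROOFS =====

-- the inner loop over range(n): columns get row[k] added pointwise, a diagonal cell is hit once
theorem pv_inner_spec (sz : Nat) (row : List Int) (i : Int) :
    ∀ (n : Nat) (cs : List Int) (d1 d2 : Int), cs.length = sz → n ≤ sz →
    (List.range n).foldl (fun q (k : Nat) => pvInnerStep i (sz : Int) row q ((k : Int))) (cs, d1, d2)
      = (cs.mapIdx (fun k v => if k < n then v + row.getD k 0 else v),
         d1 + (if 0 ≤ i ∧ i < (n : Int) then PySem.List.pyGetD row i 0 else 0),
         d2 + (if 0 ≤ (sz : Int) - 1 - i ∧ (sz : Int) - 1 - i < (n : Int)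
               then PySem.List.pyGetD row ((sz : Int) - 1 - i) 0 else 0)) := by
  intro n
  induction n with
  | zero =>
    intro cs d1 d2 hcs _
    simp only [List.range_zero, List.foldl_nil]
    refine Prod.ext ?_ (Prod.ext ?_ ?_) <;> simp
    apply List.ext_getElem (by simp)
    intro k hk1 hk2
    simp
  | succ n ih =>
    intro cs d1 d2 hcs hn
    rw [List.range_succ, List.foldl_append, ih cs d1 d2 hcs (by omega), List.foldl_cons,
        List.foldl_nil]
    have hnsz : n < sz := by omega
    have hlenm : (cs.mapIdx fun k v => if k < n then v + row.getD k 0 else v).length = sz := by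
      simp [hcs]
    simp only [pvInnerStep, PySem.List.pySetD_natCast, PySem.List.pyGetD_natCast]
    refine Prod.ext ?_ (Prod.ext ?_ ?_)
    · show _ = (cs.mapIdx fun k v => if k < n + 1 then v + row.getD k 0 else v)
      have hmn : ∀ (m k : Nat) (h : k < (cs.mapIdx fun k v => if k < m then v + row.getD k 0 else v).length),
          (cs.mapIdx fun k v => if k < m then v + row.getD k 0 else v)[k]
            = if k < m then cs[k]'(by simpa using h) + row.getD k 0 else cs[k]'(by simpa using h) := by
        intro m k h
        rw [List.getElem_mapIdx]
      apply List.ext_getElem (by simp [hcs])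
      intro k hk1 hk2
      rw [List.getElem_set, hmn (n + 1) k hk2]
      by_cases hkn : n = k
      · subst hkn
        rw [if_pos rfl, List.getD_eq_getElem _ _ (by simpa [hcs] using hnsz),
            hmn n n (by simpa [hcs] using hnsz), if_neg (lt_irrefl n), if_pos (by omega)]
      · rw [if_neg hkn, hmn n k (by simpa [hcs] using (by simpa [hcs] using hk2 : k < sz))]
        by_cases hlt : k < n
        · rw [if_pos hlt, if_pos (by omega)]
        · rw [if_neg hlt, if_neg (by omega)]
    · show (if i = (n : Int) then _ + _ else _) = _
      by_cases hin : i = (n : Int)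
      · rw [if_pos hin, if_neg (by omega), if_pos (by push_cast; omega), hin,
            PySem.List.pyGetD_natCast]
        ring
      · rw [if_neg hin]
        congr 1
        apply if_congr _ rfl rfl
        push_cast
        omega
    · show (if i + (n : Int) = (sz : Int) - 1 then _ + _ else _) = _
      by_cases hin : i + (n : Int) = (sz : Int) - 1
      · have ht : (sz : Int) - 1 - i = (n : Int) := by omega
        have h1 : ¬ (0 ≤ (sz : Int) - 1 - i ∧ (sz : Int) - 1 - i < (n : Int)) := by omega
        have h2 : (0 ≤ (sz : Int) - 1 - i ∧ (sz : Int) - 1 - i < ((n + 1 : Nat) : Int)) := by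
          push_cast; omega
        rw [if_pos hin, if_neg h1, if_pos h2, ht, PySem.List.pyGetD_natCast]
        ring
      · rw [if_neg hin]
        congr 1
        apply if_congr _ rfl rfl
        push_cast
        omega

-- the inner loop as the port runs it: over pyRange 0 size, with full column update
theorem pv_inner_full (sz : Nat) (row : List Int) (i : Int) (cs : List Int) (d1 d2 : Int)
    (hcs : cs.length = sz) :
    (PySem.List.pyRange 0 (sz : Int) 1).foldl (pvInnerStep i (sz : Int) row) (cs, d1, d2)
      = (cs.mapIdx (fun k v => v + row.getD k 0),
         d1 + (if 0 ≤ i ∧ i < (sz : Int) then PySem.List.pyGetD row i 0 else 0),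
         d2 + (if 0 ≤ (sz : Int) - 1 - i ∧ (sz : Int) - 1 - i < (sz : Int)
               then PySem.List.pyGetD row ((sz : Int) - 1 - i) 0 else 0)) := by
  rw [PySem.List.pyRange_zero_natCast, List.foldl_map,
      pv_inner_spec sz row i sz cs d1 d2 hcs le_rfl]
  refine Prod.ext ?_ rfl
  show _ = cs.mapIdx (fun k v => v + row.getD k 0)
  apply List.ext_getElem (by simp)
  intro k hk1 hk2
  rw [List.getElem_mapIdx, List.getElem_mapIdx, if_pos (by simpa [hcs] using hk2)]

theorem pv_outer_spec (sz : Nat) (rows : List (List Int)) :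
    ∀ (s : Nat) (rs cs : List Int) (d1 d2 : Int), cs.length = sz →
    (PySem.List.enumerate rows (s : Int)).foldl (pvOuterStep (sz : Int)) (rs, cs, d1, d2)
      = (rs ++ rows.map List.sum,
         rows.foldl (fun c r => c.mapIdx (fun k v => v + r.getD k 0)) cs,
         d1 + ((PySem.List.enumerate rows (s : Int)).map
                (fun p => if 0 ≤ p.1 ∧ p.1 < (sz : Int)
                          then PySem.List.pyGetD p.2 p.1 0 else 0)).sum,
         d2 + ((PySem.List.enumerate rows (s : Int)).map
                (fun p => if 0 ≤ (sz : Int) - 1 - p.1 ∧ (sz : Int) - 1 - p.1 < (sz : Int)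
                          then PySem.List.pyGetD p.2 ((sz : Int) - 1 - p.1) 0 else 0)).sum) := by
  induction rows with
  | nil => intro s rs cs d1 d2 _; simp [PySem.List.enumerate_nil]
  | cons r rows ih =>
    intro s rs cs d1 d2 hcs
    rw [PySem.List.enumerate_cons, List.foldl_cons]
    have hstep : pvOuterStep (sz : Int) (rs, cs, d1, d2) ((s : Int), r)
        = (rs ++ [r.sum], cs.mapIdx (fun k v => v + r.getD k 0),
           d1 + (if 0 ≤ (s : Int) ∧ (s : Int) < (sz : Int)
                 then PySem.List.pyGetD r (s : Int) 0 else 0),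
           d2 + (if 0 ≤ (sz : Int) - 1 - (s : Int) ∧ (sz : Int) - 1 - (s : Int) < (sz : Int)
                 then PySem.List.pyGetD r ((sz : Int) - 1 - (s : Int)) 0 else 0)) := by
      simp only [pvOuterStep]
      rw [pv_inner_full sz r (s : Int) cs d1 d2 hcs]
    rw [hstep, show (s : Int) + 1 = ((s + 1 : Nat) : Int) by push_cast; ring,
        ih (s + 1) _ _ _ _ (by simp [hcs])]
    simp only [List.map_cons, List.sum_cons, List.foldl_cons]
    refine Prod.ext (by simp) (Prod.ext rfl (Prod.ext ?_ ?_)) <;> · show _ = _; push_cast; ring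

theorem pv_foldCols_length (rows : List (List Int)) :
    ∀ cs : List Int,
    (rows.foldl (fun c r => c.mapIdx (fun k v => v + r.getD k 0)) cs).length = cs.length := by
  induction rows with
  | nil => intro cs; simp
  | cons r rows ih => intro cs; rw [List.foldl_cons, ih]; simp

theorem pv_foldCols_getD (rows : List (List Int)) :
    ∀ (cs : List Int) (k : Nat), k < cs.length →
    (rows.foldl (fun c r => c.mapIdx (fun k v => v + r.getD k 0)) cs).getD k 0
      = cs.getD k 0 + (rows.map (fun r => r.getD k 0)).sum := by
  induction rows with
  | nil => intro cs k _; simp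
  | cons r rows ih =>
    intro cs k hk
    rw [List.foldl_cons, ih _ k (by simp [hk]), List.getD_eq_getElem _ _ (by simpa using hk),
        List.getElem_mapIdx, List.getD_eq_getElem _ _ hk]
    simp only [List.map_cons, List.sum_cons]
    ring

theorem pv_ifmax (m a : Int) : (if a > m then a else m) = max m a := by
  split_ifs <;> omega

-- port-level equality is unconditional (both ports use the same defaulted lookups);
-- Pre_ is still needed for the Pythons, which raise outside it
theorem pv_main (grid : List (List Int)) :
    max_sum_in_grid grid = max_sum_in_grid_alt grid := by
  -- B side in closed form
  have hB : max_sum_in_grid_alt grid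
      = ((grid.map List.sum)
          ++ grid.foldl (fun c r => c.mapIdx (fun k v => v + r.getD k 0))
               (List.replicate grid.length 0)
          ++ [((PySem.List.enumerate grid 0).map
                 (fun p => if 0 ≤ p.1 ∧ p.1 < (grid.length : Int)
                           then PySem.List.pyGetD p.2 p.1 0 else 0)).sum,
              ((PySem.List.enumerate grid 0).map
                 (fun p => if 0 ≤ (grid.length : Int) - 1 - p.1 ∧
                              (grid.length : Int) - 1 - p.1 < (grid.length : Int)
                           then PySem.List.pyGetD p.2 ((grid.length : Int) - 1 - p.1) 0
                           else 0)).sum]).foldl max 0 := by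
    have h := pv_outer_spec grid.length grid 0 [] (List.replicate grid.length 0) 0 0 (by simp)
    simp only [Nat.cast_zero, zero_add, List.nil_append] at h
    simp only [max_sum_in_grid_alt]
    rw [h, PySem.List.max?_id_cons]
    simp
  -- A side in closed form
  have hfold2 : ∀ {β : Type} (l : List β) (f : β → Int) (init : Int),
      l.foldl (fun m v => if f v > m then f v else m) init
        = l.foldl (fun m v => max m (f v)) init := by
    intro β l f init
    exact PySem.List.foldl_congr_mem l _ _ _ (fun acc x _ => pv_ifmax _ _)
  have hA : ((grid.map List.sum)
          ++ (PySem.List.pyRange 0 (grid.length : Int) 1).map (fun col =>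
                (PySem.List.pyRange 0 (grid.length : Int) 1).foldl
                  (fun s r => s + PySem.List.pyGetD (PySem.List.pyGetD grid r []) col 0) 0)
          ++ [(PySem.List.pyRange 0 (grid.length : Int) 1).foldl
                (fun s i => s + PySem.List.pyGetD (PySem.List.pyGetD grid i []) i 0) 0,
              (PySem.List.pyRange 0 (grid.length : Int) 1).foldl
                (fun s i => s + PySem.List.pyGetD (PySem.List.pyGetD grid i [])
                   ((grid.length : Int) - 1 - i) 0) 0]).foldl max 0
      = max_sum_in_grid grid := by
    simp only [max_sum_in_grid]
    rw [List.foldl_append, List.foldl_append, List.foldl_map, List.foldl_map]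
    simp only [List.foldl_cons, List.foldl_nil]
    rw [hfold2 grid List.sum, hfold2 (PySem.List.pyRange 0 (grid.length : Int) 1),
        pv_ifmax, pv_ifmax]
  rw [← hA, hB]
  -- columns agree
  have hcol : grid.foldl (fun c r => c.mapIdx (fun k v => v + r.getD k 0))
        (List.replicate grid.length 0)
      = (PySem.List.pyRange 0 (grid.length : Int) 1).map (fun col =>
            (PySem.List.pyRange 0 (grid.length : Int) 1).foldl
              (fun s r => s + PySem.List.pyGetD (PySem.List.pyGetD grid r []) col 0) 0) := by
    apply List.ext_getElem
    · rw [pv_foldCols_length]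
      simp [PySem.List.length_pyRange_one]
    · intro k hk1 hk2
      have hk : k < grid.length := by rw [pv_foldCols_length] at hk1; simpa using hk1
      rw [← List.getD_eq_getElem _ 0 hk1,
          pv_foldCols_getD grid (List.replicate grid.length 0) k (by simpa using hk)]
      rw [List.getElem_map, PySem.List.getElem_pyRange_one]
      rw [PySem.List.foldl_pyRange_zero_pyGetD' grid ([] : List Int)
            (fun acc row => acc + PySem.List.pyGetD row (0 + (k : Int)) 0) 0,
          PySem.List.foldl_add]
      simp
  -- diagonals agree
  have hdia : ∀ F : Int → Int, (∀ j : Int, 0 ≤ j → j < (grid.length : Int) →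
        0 ≤ F j ∧ F j < (grid.length : Int)) →
      ((PySem.List.enumerate grid 0).map
         (fun p => if 0 ≤ F p.1 ∧ F p.1 < (grid.length : Int)
                   then PySem.List.pyGetD p.2 (F p.1) 0 else 0)).sum
        = (PySem.List.pyRange 0 (grid.length : Int) 1).foldl
            (fun s i => s + PySem.List.pyGetD (PySem.List.pyGetD grid i []) (F i) 0) 0 := by
    intro F hF
    rw [PySem.List.foldl_add, PySem.List.enumerate_eq_map_pyRange grid ([] : List Int),
        List.map_map]
    simp only [PySem.List.len_eq, zero_add]
    congr 1
    apply List.map_congr_left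
    intro j hj
    have hj' := (PySem.List.mem_pyRange_one).mp hj
    have hFj := hF j hj'.1 hj'.2
    simp only [Function.comp]
    rw [if_pos ⟨hFj.1, hFj.2⟩]
  rw [hcol, ← hdia (fun i => i) (fun j h1 h2 => ⟨h1, h2⟩),
      ← hdia (fun i => (grid.length : Int) - 1 - i)
          (fun j h1 h2 => ⟨by dsimp only; omega, by dsimp only; omega⟩)]

-- ===== VERDICT (by name: the statement is the Claim_ definition above) =====
theorem max_sum_in_grid_spec : Claim_equal_max_sum_in_grid := by
  intro grid _ hPre
  unfold Spec_max_sum_in_grid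
  exact pv_main grid
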